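-- pv_equiv track=rewrite | github.com/bivex/Melodica | melodica/generators/_melody_pitch.py | _all_pitches_in_range
-- ===== SOURCE A (Python) =====
-- def _all_pitches_in_range(pc: int, low: int, high: int) -> list[int]:
--     """All MIDI pitches with the given pitch class in [low, high]."""
--     pc = pc % 12
--     result = []
--     start = pc + ((low - pc + 11) // 12) * 12
--     p = start
--     while p <= high:
--         result.append(p)
--         p += 12
--     return result
-- ===== SOURCE B (Python) =====
-- def _all_pitches_in_range(pc: int, low: int, high: int) -> list[int]:
--     """All MIDI pitches with the given pitch class in [low, high]."""
--     pc = pc % 12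
--     return [p for p in range(low, high + 1) if p % 12 == pc]
-- ===== Notes on version B (the rewrite author's own statement) =====
-- stated objective: simpler
-- what changed: B scans every integer of [low, high] and keeps those whose value mod 12 equals the normalised pitch class, instead of A's closed-form ceiling computation of the first match followed by a stride-12 pointer loop.
import Mathlib
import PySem

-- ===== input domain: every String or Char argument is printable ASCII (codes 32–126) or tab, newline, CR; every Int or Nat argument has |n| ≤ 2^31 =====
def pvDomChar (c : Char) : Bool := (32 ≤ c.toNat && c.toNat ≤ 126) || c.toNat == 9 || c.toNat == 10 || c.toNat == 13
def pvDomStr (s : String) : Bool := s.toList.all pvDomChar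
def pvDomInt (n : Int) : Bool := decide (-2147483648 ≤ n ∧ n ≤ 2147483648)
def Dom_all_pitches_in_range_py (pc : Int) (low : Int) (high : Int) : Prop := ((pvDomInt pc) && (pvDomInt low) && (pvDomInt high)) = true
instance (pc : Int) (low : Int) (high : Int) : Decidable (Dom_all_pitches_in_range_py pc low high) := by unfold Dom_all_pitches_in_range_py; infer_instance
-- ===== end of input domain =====

-- B replaces A's closed-form first-match + stride-12 pointer loop by a plain scan
-- of the whole range [low, high] filtered by pitch class (objective: simpler).

-- ===== PORT A =====
-- the 'while p <= high' loop of A, accumulating into `result`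
def pvALoop (high : Int) (p : Int) (acc : List Int) : List Int :=
  if p ≤ high then pvALoop high (p + 12) (acc ++ [p]) else acc
termination_by (high + 1 - p).toNat
decreasing_by omega

def all_pitches_in_range_py (pc : Int) (low : Int) (high : Int) : List Int :=
  let pc2 := PySem.Int.mod pc 12
  let start := pc2 + (PySem.Int.floordiv (low - pc2 + 11) 12) * 12
  pvALoop high start []

-- ===== PORT B =====
def all_pitches_in_range_py_alt (pc : Int) (low : Int) (high : Int) : List Int :=
  let pc2 := PySem.Int.mod pc 12
  (PySem.List.pyRange low (high + 1) 1).filter (fun p => PySem.Int.mod p 12 == pc2)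

-- ===== PRECONDITION & SPEC =====
def Spec_all_pitches_in_range_py (pc : Int) (low : Int) (high : Int) (out : List Int) : Prop := out = all_pitches_in_range_py_alt pc low high
instance (pc : Int) (low : Int) (high : Int) (out : List Int) : Decidable (Spec_all_pitches_in_range_py pc low high out) := by unfold Spec_all_pitches_in_range_py; infer_instance

-- ===== CLAIM (what is proved, stated in full; the proofs are below) =====
def Claim_equal_all_pitches_in_range_py : Prop := ∀ (pc : Int) (low : Int) (high : Int), Dom_all_pitches_in_range_py pc low high → Spec_all_pitches_in_range_py pc low high (all_pitches_in_range_py pc low high)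

-- ===== LEMMAS AND PROOFS =====

theorem pvALoop_acc (high : Int) : ∀ (n : Nat) (p : Int), (high + 1 - p).toNat ≤ n →
    ∀ (acc : List Int), pvALoop high p acc = acc ++ pvALoop high p [] := by
  intro n
  induction n with
  | zero =>
    intro p hp acc
    have h : ¬ p ≤ high := by omega
    conv_lhs => rw [pvALoop]
    conv_rhs => rw [pvALoop]
    rw [if_neg h, if_neg h]
    simp
  | succ n ih =>
    intro p hp acc
    conv_lhs => rw [pvALoop]
    conv_rhs => rw [pvALoop]
    by_cases h : p ≤ high
    · rw [if_pos h, if_pos h]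
      rw [ih (p + 12) (by omega) (acc ++ [p]), ih (p + 12) (by omega) ([] ++ [p])]
      simp
    · rw [if_neg h, if_neg h]; simp

theorem pv_main (high r : Int) (hr0 : 0 ≤ r) (hr : r < 12) :
    ∀ (n : Nat) (lo : Int), (high + 1 - lo).toNat ≤ n →
    (PySem.List.pyRange lo (high + 1) 1).filter (fun p => PySem.Int.mod p 12 == r)
      = pvALoop high (r + (PySem.Int.floordiv (lo - r + 11) 12) * 12) [] := by
  intro n
  induction n with
  | zero =>
    intro lo hlo
    rw [PySem.List.pyRange_one_eq_nil (by omega)]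
    have hs : lo ≤ r + (PySem.Int.floordiv (lo - r + 11) 12) * 12 := by
      rw [PySem.Int.floordiv_eq_ediv_of_pos (by norm_num : (0:Int) < 12)]; omega
    rw [pvALoop, if_neg (by omega)]
    simp
  | succ n ih =>
    intro lo hlo
    by_cases h : lo ≤ high
    · rw [PySem.List.pyRange_one_cons (by omega), List.filter_cons]
      have hmod : PySem.Int.mod lo 12 = lo % 12 := PySem.Int.mod_eq_emod_of_pos (by norm_num)
      have hfd : PySem.Int.floordiv (lo - r + 11) 12 = (lo - r + 11) / 12 :=
        PySem.Int.floordiv_eq_ediv_of_pos (by norm_num)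
      have hfd' : PySem.Int.floordiv (lo + 1 - r + 11) 12 = (lo + 1 - r + 11) / 12 :=
        PySem.Int.floordiv_eq_ediv_of_pos (by norm_num)
      by_cases hm : lo % 12 = r
      · -- lo matches the pitch class: A's start for this suffix is lo itself
        have hs : r + (PySem.Int.floordiv (lo - r + 11) 12) * 12 = lo := by
          rw [hfd]; omega
        have hs' : r + (PySem.Int.floordiv (lo + 1 - r + 11) 12) * 12 = lo + 12 := by
          rw [hfd']; omega
        have hb : (PySem.Int.mod lo 12 == r) = true := by
          rw [hmod, hm]; simp
        rw [hb, if_pos rfl, hs]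
        conv_rhs => rw [pvALoop]
        rw [if_pos h]
        rw [pvALoop_acc high ((high + 1 - (lo + 12)).toNat) (lo + 12) (le_refl _) ([] ++ [lo])]
        rw [ih (lo + 1) (by omega), hs']
        simp
      · -- lo does not match: the start is unchanged
        have hb : (PySem.Int.mod lo 12 == r) = false := by
          rw [hmod]; simp [hm]
        rw [hb]
        simp only [Bool.false_eq_true, if_false]
        have hs : (PySem.Int.floordiv (lo + 1 - r + 11) 12) = (PySem.Int.floordiv (lo - r + 11) 12) := by
          rw [hfd, hfd']; omega
        rw [ih (lo + 1) (by omega), hs]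
    · rw [PySem.List.pyRange_one_eq_nil (by omega)]
      have hs : lo ≤ r + (PySem.Int.floordiv (lo - r + 11) 12) * 12 := by
        rw [PySem.Int.floordiv_eq_ediv_of_pos (by norm_num : (0:Int) < 12)]; omega
      rw [pvALoop, if_neg (by omega)]
      simp

-- ===== VERDICT (by name: the statement is the Claim_ definition above) =====
theorem all_pitches_in_range_py_spec : Claim_equal_all_pitches_in_range_py := by
  intro pc low high _
  unfold Spec_all_pitches_in_range_py all_pitches_in_range_py all_pitches_in_range_py_alt
  have hr : PySem.Int.mod pc 12 = pc % 12 := PySem.Int.mod_eq_emod_of_pos (by norm_num)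
  simp only []
  rw [pv_main high (PySem.Int.mod pc 12) (by rw [hr]; omega) (by rw [hr]; omega)
      ((high + 1 - low).toNat) low (le_refl _)]
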